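-- pv_equiv track=rewrite | github.com/gehirndienst/gstwebrtcapp | gstwebrtcapp/utils/base.py | slice_list_in_intervals
-- ===== SOURCE A (Python) =====
-- from typing import Any, Callable, Dict, List, Tuple
--
-- def slice_list_in_intervals(
--     input_list: List[Any],
--     num_intervals: int,
--     intervals_type: str = 'equidistant',
-- ) -> List[List[Any]]:
--     """
--     Get equidistant or sliding intervals from the input list. Regulated by intervals_type.
--     E.g., [1, 2, 3, 4, 5, 6, 7, 8, 9, 10] with num_intervals = 3
--
--     equidistant -> [[1, 2, 3, 4], [5, 6, 7], [8, 9, 10]]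
--
--     sliding -> [[1, 2, 3, 4], [1, 2, 3, 4, 5, 6, 7], [1, 2, 3, 4, 5, 6, 7, 8, 9, 10]]
--
--     :param input_list: list of values
--     :param num_intervals: number of intervals
--     :param intervals_type: type of intervals. One of 'equidistant', 'sliding'
--     :return: list of intervals
--     """
--
--     intervals_type = intervals_type.lower() if intervals_type in ['equidistant', 'sliding'] else 'equidistant'
--     intervals = []
--     interval_length = len(input_list) // num_intervals
--     remainder = len(input_list) % num_intervals
--
--     start_index = 0
--     for i in range(num_intervals):
--         end_index = start_index + interval_length + (1 if i < remainder else 0)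
--         if intervals_type == 'equidistant':
--             interval_values = input_list[start_index:end_index]
--         else:
--             interval_values = input_list[:end_index]
--         intervals.append(interval_values)
--         start_index = end_index
--
--     return intervals
-- ===== SOURCE B (Python) =====
-- from itertools import accumulate
-- from typing import Any, List
--
--
-- def slice_list_in_intervals(
--     input_list: List[Any],
--     num_intervals: int,
--     intervals_type: str = 'equidistant',
-- ) -> List[List[Any]]:
--     q, r = divmod(len(input_list), num_intervals)
--     lengths = [q + 1 if i < r else q for i in range(num_intervals)]
--     bounds = [0, *accumulate(lengths)]
--     chunks = [input_list[a:b] for a, b in zip(bounds, bounds[1:])]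
--     kind = intervals_type if intervals_type in ('equidistant', 'sliding') else 'equidistant'
--     if kind == 'sliding':
--         return list(accumulate(chunks, lambda acc, c: acc + c))
--     return chunks
-- ===== Notes on version B (the rewrite author's own statement) =====
-- stated objective: alternative
-- what changed: Instead of one stateful loop carrying start_index and re-slicing per iteration, B computes the interval lengths, takes their prefix sums as boundary indices, slices the equidistant chunks from consecutive boundary pairs, and obtains the sliding intervals by running concatenation (itertools.accumulate) over those chunks.
import Mathlib
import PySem

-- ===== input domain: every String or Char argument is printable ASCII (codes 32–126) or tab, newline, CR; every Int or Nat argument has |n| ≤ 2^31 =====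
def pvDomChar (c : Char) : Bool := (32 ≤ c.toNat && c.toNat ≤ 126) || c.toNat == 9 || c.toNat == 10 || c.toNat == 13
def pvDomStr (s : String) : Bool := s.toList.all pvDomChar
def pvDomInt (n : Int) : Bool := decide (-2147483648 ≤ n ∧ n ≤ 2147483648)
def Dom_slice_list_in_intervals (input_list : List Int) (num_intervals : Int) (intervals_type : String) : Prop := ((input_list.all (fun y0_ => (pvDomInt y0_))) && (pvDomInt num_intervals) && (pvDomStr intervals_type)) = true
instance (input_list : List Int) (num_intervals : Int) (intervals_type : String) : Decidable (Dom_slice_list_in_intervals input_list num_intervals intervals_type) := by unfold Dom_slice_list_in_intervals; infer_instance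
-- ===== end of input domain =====

-- B replaces A's stateful start_index loop by boundary prefix sums (scanl), chunking by
-- consecutive boundary pairs, and accumulate-concatenation for the sliding case; objective: alternative.


-- ===== PORT A =====
def slice_list_in_intervals (input_list : List Int) (num_intervals : Int) (intervals_type : String) : List (List Int) :=
  let t := if intervals_type = "equidistant" ∨ intervals_type = "sliding"
           then PySem.Str.lower intervals_type else "equidistant"
  let interval_length := PySem.Int.floordiv (PySem.List.len input_list) num_intervals
  let remainder := PySem.Int.mod (PySem.List.len input_list) num_intervals
  let res := (PySem.List.pyRange 0 num_intervals 1).foldl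
    (fun (st : List (List Int) × Int) i =>
      let end_index := st.2 + interval_length + (if i < remainder then (1 : Int) else 0)
      let interval_values :=
        if t = "equidistant" then PySem.List.slice input_list (some st.2) (some end_index)
        else PySem.List.slice input_list none (some end_index)
      (st.1 ++ [interval_values], end_index))
    ([], 0)
  res.1

-- ===== PORT B =====
def slice_list_in_intervals_alt (input_list : List Int) (num_intervals : Int) (intervals_type : String) : List (List Int) :=
  let q := PySem.Int.floordiv (PySem.List.len input_list) num_intervals
  let r := PySem.Int.mod (PySem.List.len input_list) num_intervals
  let lengths := (PySem.List.pyRange 0 num_intervals 1).map (fun i => if i < r then q + 1 else q)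
  -- bounds = [0, *accumulate(lengths)]
  let bounds := lengths.scanl (· + ·) 0
  let chunks := (bounds.zip bounds.tail).map (fun p => PySem.List.slice input_list (some p.1) (some p.2))
  let kind := if intervals_type = "equidistant" ∨ intervals_type = "sliding"
              then intervals_type else "equidistant"
  if kind = "sliding" then
    -- list(accumulate(chunks, +)) = drop the seed [] of the running-concatenation scan
    (chunks.scanl (· ++ ·) []).tail
  else chunks

-- ===== PRECONDITION & SPEC =====
-- num_intervals = 0 is excluded: there Python A raises ZeroDivisionError (len // 0).
def Pre_slice_list_in_intervals (input_list : List Int) (num_intervals : Int) (intervals_type : String) : Prop :=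
  num_intervals ≠ 0
instance (input_list : List Int) (num_intervals : Int) (intervals_type : String) : Decidable (Pre_slice_list_in_intervals input_list num_intervals intervals_type) := by unfold Pre_slice_list_in_intervals; infer_instance
def pvWitness_slice_list_in_intervals : List Int × Int × String := ([1, 2, 3, 4, 5], 3, "sliding")

def Spec_slice_list_in_intervals (input_list : List Int) (num_intervals : Int) (intervals_type : String) (out : List (List Int)) : Prop := out = slice_list_in_intervals_alt input_list num_intervals intervals_type
instance (input_list : List Int) (num_intervals : Int) (intervals_type : String) (out : List (List Int)) : Decidable (Spec_slice_list_in_intervals input_list num_intervals intervals_type out) := by unfold Spec_slice_list_in_intervals; infer_instance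

-- ===== CLAIM (what is proved, stated in full; the proofs are below) =====
def Claim_equal_slice_list_in_intervals : Prop := ∀ (input_list : List Int) (num_intervals : Int) (intervals_type : String), Dom_slice_list_in_intervals input_list num_intervals intervals_type → Pre_slice_list_in_intervals input_list num_intervals intervals_type → Spec_slice_list_in_intervals input_list num_intervals intervals_type (slice_list_in_intervals input_list num_intervals intervals_type)

-- ===== LEMMAS AND PROOFS =====

-- zip of a (+)-scanl with its own tail peels one boundary pair at a time
theorem pv_zip_tail_scanl (s m : Int) (ms : List Int) :
    ((s :: ms.scanl (· + ·) (s + m)).zip (ms.scanl (· + ·) (s + m)))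
      = (s, s + m) :: ((ms.scanl (· + ·) (s + m)).zip (ms.scanl (· + ·) (s + m)).tail) := by
  cases ms <;> simp [List.scanl_nil]

-- mapping over a (+)-scanl exposes its head
theorem pv_map_scanl_cons {α : Type} (f : Int → α) (c : Int) (ms : List Int) :
    (ms.scanl (· + ·) c).map f = f c :: ((ms.scanl (· + ·) c).tail.map f) := by
  cases ms <;> simp [List.scanl_nil]

-- A's equidistant loop = chunks of consecutive scanl boundaries
theorem pv_foldA_eq (L : List Int) (q r : Int) :
    ∀ (is : List Int) (acc : List (List Int)) (s : Int),
    (is.foldl (fun (st : List (List Int) × Int) i =>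
        (st.1 ++ [PySem.List.slice L (some st.2) (some (st.2 + q + (if i < r then (1 : Int) else 0)))],
         st.2 + q + (if i < r then (1 : Int) else 0))) (acc, s)).1
    = acc ++ ((((is.map (fun i => q + (if i < r then (1 : Int) else 0))).scanl (· + ·) s).zip
               ((is.map (fun i => q + (if i < r then (1 : Int) else 0))).scanl (· + ·) s).tail).map
              (fun p => PySem.List.slice L (some p.1) (some p.2))) := by
  intro is
  induction is with
  | nil => intro acc s; simp [List.scanl_nil]
  | cons i is ih =>
    intro acc s
    have hstep : s + q + (if i < r then (1 : Int) else 0)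
        = s + (q + (if i < r then (1 : Int) else 0)) := by ring
    simp only [List.foldl_cons, List.map_cons, List.scanl_cons, List.tail_cons]
    rw [ih, hstep, pv_zip_tail_scanl]
    simp

-- A's sliding loop = prefixes at the scanl boundaries (seed dropped)
theorem pv_foldA_sl (L : List Int) (q r : Int) :
    ∀ (is : List Int) (acc : List (List Int)) (s : Int),
    (is.foldl (fun (st : List (List Int) × Int) i =>
        (st.1 ++ [PySem.List.slice L none (some (st.2 + q + (if i < r then (1 : Int) else 0)))],
         st.2 + q + (if i < r then (1 : Int) else 0))) (acc, s)).1
    = acc ++ (((is.map (fun i => q + (if i < r then (1 : Int) else 0))).scanl (· + ·) s).tail.map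
              (fun b => PySem.List.slice L none (some b))) := by
  intro is
  induction is with
  | nil => intro acc s; simp [List.scanl_nil]
  | cons i is ih =>
    intro acc s
    have hstep : s + q + (if i < r then (1 : Int) else 0)
        = s + (q + (if i < r then (1 : Int) else 0)) := by ring
    simp only [List.foldl_cons, List.map_cons, List.scanl_cons, List.tail_cons]
    rw [ih, hstep, pv_map_scanl_cons]
    simp

-- gluing one chunk onto a prefix extends the prefix
theorem pv_slice_glue (L : List Int) (a b : Int) (ha : 0 ≤ a) (hab : a ≤ b) :
    PySem.List.slice L none (some a) ++ PySem.List.slice L (some a) (some b)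
      = PySem.List.slice L none (some b) := by
  have hb : 0 ≤ b := le_trans ha hab
  rw [PySem.List.slice_to L ha, PySem.List.slice_to L hb, PySem.List.slice_toNat L ha hb]
  have h : b.toNat = a.toNat + (b.toNat - a.toNat) := by omega
  rw [h, List.take_add]
  simp

-- B's accumulate over the chunks = prefixes at every scanl boundary
theorem pv_accum_chunks (L : List Int) :
    ∀ (ms : List Int) (s : Int), 0 ≤ s → (∀ m ∈ ms, 0 ≤ m) →
    ((((ms.scanl (· + ·) s).zip (ms.scanl (· + ·) s).tail).map
        (fun p => PySem.List.slice L (some p.1) (some p.2))).scanl (· ++ ·)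
      (PySem.List.slice L none (some s)))
    = (ms.scanl (· + ·) s).map (fun b => PySem.List.slice L none (some b)) := by
  intro ms
  induction ms with
  | nil => intro s _ _; simp [List.scanl_nil]
  | cons m ms ih =>
    intro s hs hm
    have hm0 : 0 ≤ m := hm m (by simp)
    have hsm : 0 ≤ s + m := by omega
    simp only [List.scanl_cons, List.tail_cons]
    rw [pv_zip_tail_scanl]
    simp only [List.map_cons, List.scanl_cons]
    rw [pv_slice_glue L s (s + m) hs (by omega),
        ih (s + m) hsm (fun x hx => hm x (by simp [hx])), pv_map_scanl_cons]

theorem slice_list_in_intervals_spec_aux (L : List Int) (num : Int) (ty : String)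
    (hnum : num ≠ 0) :
    slice_list_in_intervals L num ty = slice_list_in_intervals_alt L num ty := by
  rcases lt_or_gt_of_ne hnum with hneg | hpos
  · -- num < 0: range is empty, both sides are []
    unfold slice_list_in_intervals slice_list_in_intervals_alt
    rw [PySem.List.pyRange_one_eq_nil (by omega)]
    simp [List.scanl_nil]
  · -- num > 0
    unfold slice_list_in_intervals slice_list_in_intervals_alt
    set q := PySem.Int.floordiv (PySem.List.len L) num with hq
    set r := PySem.Int.mod (PySem.List.len L) num with hr
    have hq0 : 0 ≤ q := by
      rw [hq, PySem.Int.floordiv_eq_ediv_of_pos hpos]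
      exact Int.ediv_nonneg (by simp [PySem.List.len_eq]) (le_of_lt hpos)
    have hlen : (fun i => if i < r then q + 1 else q)
        = (fun i => q + (if i < r then (1 : Int) else 0)) := by
      funext i; split_ifs <;> ring
    have hmem : ∀ m ∈ (PySem.List.pyRange 0 num 1).map
        (fun i => q + (if i < r then (1 : Int) else 0)), 0 ≤ m := by
      intro m hm
      rcases List.mem_map.mp hm with ⟨i, _, hi⟩
      subst hi; split_ifs <;> omega
    by_cases hsl : ty = "sliding"
    · subst hsl
      have ht : PySem.Str.lower "sliding" = "sliding" := by decide
      simp only [hlen, ht, or_true, if_pos, String.reduceEq, reduceIte]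
      rw [pv_foldA_sl L q r]
      have h0 : ([] : List Int) = PySem.List.slice L none (some 0) := by
        rw [PySem.List.slice_to L (le_refl (0 : Int))]; simp
      rw [h0, pv_accum_chunks L _ 0 (le_refl 0) hmem, pv_map_scanl_cons]
      simp
    · have hbranch :
          (if ty = "equidistant" ∨ ty = "sliding" then PySem.Str.lower ty else "equidistant")
            = "equidistant" := by
        by_cases heq : ty = "equidistant"
        · subst heq; simp; decide
        · simp [heq, hsl]
      have hkind :
          (if ty = "equidistant" ∨ ty = "sliding" then ty else "equidistant") ≠ "sliding" := by
        by_cases heq : ty = "equidistant" <;> simp [heq, hsl]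
      simp only [hbranch, hlen, reduceIte, if_neg hkind]
      rw [pv_foldA_eq L q r]
      simp

-- ===== VERDICT (by name: the statement is the Claim_ definition above) =====
theorem slice_list_in_intervals_spec : Claim_equal_slice_list_in_intervals := by
  intro L num ty _ hpre
  exact slice_list_in_intervals_spec_aux L num ty hpre
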